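-- pv_equiv track=rewrite | github.com/ante-neh/Leetcodepractice | competetiveProgrammingContest/Count_Distinct_Absolute_Values_in_a_Sorted_Array/solution.py | getCountDistinct
-- ===== SOURCE A (Python) =====
-- def getCountDistinct(nums):
--     counter=0
--     numsCount={}
--     for i in range(len(nums)):
--         if nums[i]>=0 and nums[i] not in numsCount:
--             numsCount[nums[i]]=1+numsCount.get(nums[i],0)
--             counter+=1
--     return counter
-- ===== SOURCE B (Python) =====
-- def getCountDistinct(nums):
--     xs = sorted([x for x in nums if x >= 0])
--     count = 0
--     prev = None
--     for x in xs:
--         if prev is None or x != prev: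
--             count += 1
--         prev = x
--     return count
-- ===== Notes on version B (the rewrite author's own statement) =====
-- stated objective: alternative
-- what changed: Replaces A's hash-dict membership test during a single indexed pass with sort-then-adjacent-comparison dedup over the non-negative elements.
import Mathlib
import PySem

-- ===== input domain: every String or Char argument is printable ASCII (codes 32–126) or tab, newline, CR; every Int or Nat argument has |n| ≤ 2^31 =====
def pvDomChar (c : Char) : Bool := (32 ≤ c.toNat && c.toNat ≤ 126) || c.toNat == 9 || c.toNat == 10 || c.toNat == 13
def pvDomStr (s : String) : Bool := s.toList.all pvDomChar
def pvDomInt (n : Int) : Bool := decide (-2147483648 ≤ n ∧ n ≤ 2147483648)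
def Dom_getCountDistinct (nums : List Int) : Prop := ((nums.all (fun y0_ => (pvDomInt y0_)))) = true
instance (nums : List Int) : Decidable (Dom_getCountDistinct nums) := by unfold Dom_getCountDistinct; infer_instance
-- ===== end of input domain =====

-- B replaces A's dict-membership indexed pass with sort-then-adjacent-comparison dedup; alternative algorithm, same return value.

-- ===== PORT A =====
def getCountDistinct (nums : List Int) : Int :=
  ((PySem.List.pyRange 0 nums.length 1).foldl
    (fun (st : Int × PySem.Dict Int Int) i =>
      if 0 ≤ PySem.List.pyGetD nums i 0 ∧ ¬ st.2.contains (PySem.List.pyGetD nums i 0) then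
        (st.1 + 1, st.2.insert (PySem.List.pyGetD nums i 0)
          (1 + st.2.getD (PySem.List.pyGetD nums i 0) 0))
      else st)
    (0, PySem.Dict.empty)).1

-- ===== PORT B =====
def getCountDistinct_alt (nums : List Int) : Int :=
  ((PySem.List.sorted (nums.filter (fun x => decide (0 ≤ x))) (fun x => x) false).foldl
    (fun (st : Int × Option Int) x =>
      (if st.2 = none ∨ st.2 ≠ some x then st.1 + 1 else st.1, some x))
    (0, none)).1

-- ===== PRECONDITION & SPEC =====
def Spec_getCountDistinct (nums : List Int) (out : Int) : Prop := out = getCountDistinct_alt nums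
instance (nums : List Int) (out : Int) : Decidable (Spec_getCountDistinct nums out) := by unfold Spec_getCountDistinct; infer_instance

-- ===== CLAIM (what is proved, stated in full; the proofs are below) =====
def Claim_equal_getCountDistinct : Prop := ∀ (nums : List Int), Dom_getCountDistinct nums → Spec_getCountDistinct nums (getCountDistinct nums)

-- ===== LEMMAS AND PROOFS =====

-- A's fold: counter ends at c plus the number of distinct non-negative values of xs not already keys of d.
lemma foldA_spec (xs : List Int) (c : Int) (d : PySem.Dict Int Int) :
    (xs.foldl
      (fun (st : Int × PySem.Dict Int Int) x =>
        if 0 ≤ x ∧ ¬ st.2.contains x then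
          (st.1 + 1, st.2.insert x (1 + st.2.getD x 0))
        else st)
      (c, d)).1
    = c + (((xs.filter (fun x => decide (0 ≤ x))).toFinset \ d.keys.toFinset).card : Int) := by
  induction xs generalizing c d with
  | nil => simp
  | cons x xs ih =>
    simp only [List.foldl_cons, List.filter_cons]
    by_cases hx : 0 ≤ x
    · by_cases hc : d.contains x
      · have hxk : x ∈ d.keys := (PySem.Dict.contains_iff_mem_keys d x).1 hc
        rw [if_neg (by simp [hc])]
        simp only [hx, decide_true, if_true, List.toFinset_cons, ih]
        have hins : insert x (xs.filter (fun x => decide (0 ≤ x))).toFinset \ d.keys.toFinset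
            = (xs.filter (fun x => decide (0 ≤ x))).toFinset \ d.keys.toFinset := by
          apply Finset.ext; intro y
          by_cases hy : y = x <;> simp [hy, hxk]
        rw [hins]
      · have hxk : x ∉ d.keys := fun h => hc ((PySem.Dict.contains_iff_mem_keys d x).2 h)
        rw [if_pos (by simp [hx, hc])]
        simp only [hx, decide_true, if_true, List.toFinset_cons, ih]
        have hkeys : ((d.insert x (1 + d.getD x 0)).keys).toFinset = insert x d.keys.toFinset := by
          apply Finset.ext; intro y; simp [PySem.Dict.mem_keys_insert]
        rw [hkeys]
        have hsplit : insert x (xs.filter (fun x => decide (0 ≤ x))).toFinset \ d.keys.toFinset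
            = insert x ((xs.filter (fun x => decide (0 ≤ x))).toFinset \ insert x d.keys.toFinset) := by
          apply Finset.ext; intro y
          by_cases hy : y = x <;> simp [hy, hxk]
        rw [hsplit, Finset.card_insert_of_notMem (by simp)]
        push_cast
        ring
    · rw [if_neg (by simp [hx])]
      simp only [hx, decide_false]
      exact ih c d

-- B's scan over a sorted list: counts the distinct values, values equal to prev excluded (prev is a lower bound).
lemma foldB_spec (l : List Int) (hl : l.Pairwise (· ≤ ·)) :
    ∀ (c : Int) (prev : Option Int), (∀ p, prev = some p → ∀ y ∈ l, p ≤ y) →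
    (l.foldl
      (fun (st : Int × Option Int) x =>
        (if st.2 = none ∨ st.2 ≠ some x then st.1 + 1 else st.1, some x))
      (c, prev)).1
    = c + ((l.toFinset \ (prev.elim ∅ fun p => {p})).card : Int) := by
  induction l with
  | nil => intro c prev _; simp
  | cons x l ih =>
    intro c prev hprev
    have hx : ∀ y ∈ l, x ≤ y := (List.pairwise_cons.1 hl).1
    have hl' : l.Pairwise (· ≤ ·) := (List.pairwise_cons.1 hl).2
    have hnext : ∀ p, (some x : Option Int) = some p → ∀ y ∈ l, p ≤ y := by
      intro p hp y hy; cases hp; exact hx y hy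
    rcases prev with _ | p
    · simp only [List.foldl_cons]
      rw [if_pos (by simp), ih hl' (c + 1) (some x) hnext]
      simp only [Option.elim, List.toFinset_cons, Finset.sdiff_empty]
      rw [show insert x l.toFinset = insert x (l.toFinset \ {x}) by
            apply Finset.ext; intro y; by_cases hy : y = x <;> simp [hy],
          Finset.card_insert_of_notMem (by simp)]
      push_cast; ring
    · by_cases hpx : p = x
      · subst hpx
        simp only [List.foldl_cons]
        rw [if_neg (by simp), ih hl' c (some p) hnext]
        simp only [Option.elim, List.toFinset_cons]
        congr 3
        apply Finset.ext; intro y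
        by_cases hy : y = p <;> simp [hy]
      · have hpl : p ∉ l.toFinset := by
          simp only [List.mem_toFinset]
          intro hmem
          exact hpx (le_antisymm (hprev p rfl x List.mem_cons_self) (hx p hmem))
        simp only [List.foldl_cons]
        rw [if_pos (Or.inr (by simp [hpx])), ih hl' (c + 1) (some x) hnext]
        simp only [Option.elim, List.toFinset_cons]
        have hleft : insert x l.toFinset \ {p} = insert x ((l.toFinset \ {p}) \ {x}) := by
          apply Finset.ext; intro y
          by_cases hy : y = x <;> simp [hy, Ne.symm hpx]
        have hdd : (l.toFinset \ {p}) \ {x} = l.toFinset \ {x} := by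
          apply Finset.ext; intro y
          by_cases hy : y = p <;> simp [hy, hpl]
        rw [hleft, Finset.card_insert_of_notMem (by simp), hdd]
        push_cast; ring

-- ===== VERDICT (by name: the statement is the Claim_ definition above) =====
theorem getCountDistinct_spec : Claim_equal_getCountDistinct := by
  intro nums _
  unfold Spec_getCountDistinct getCountDistinct getCountDistinct_alt
  rw [PySem.List.foldl_pyRange_zero_pyGetD' nums 0
    (fun (st : Int × PySem.Dict Int Int) x =>
      if 0 ≤ x ∧ ¬ st.2.contains x then
        (st.1 + 1, st.2.insert x (1 + st.2.getD x 0))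
      else st) (0, PySem.Dict.empty)]
  have hperm : (PySem.List.sorted (nums.filter (fun x => decide (0 ≤ x))) (fun x => x) false).Perm
      (nums.filter (fun x => decide (0 ≤ x))) := PySem.List.sorted_perm _ _ _
  have hpair : (PySem.List.sorted (nums.filter (fun x => decide (0 ≤ x))) (fun x => x) false).Pairwise (· ≤ ·) :=
    PySem.List.sorted_pairwise _ _
  rw [foldA_spec, foldB_spec _ hpair 0 none (by simp)]
  have htf : (PySem.List.sorted (nums.filter (fun x => decide (0 ≤ x))) (fun x => x) false).toFinset
      = (nums.filter (fun x => decide (0 ≤ x))).toFinset := by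
    apply Finset.ext; intro y
    simp [List.mem_toFinset, PySem.List.mem_sorted]
  rw [htf]
  simp [PySem.Dict.empty, PySem.Dict.keys]
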